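-- pv_equiv track=rewrite | github.com/marieshifeng/AoC22 | 15/code.py | get_blocked_area
-- ===== SOURCE A (Python) =====
-- Y = 2000000
--
-- def get_taxi_distance(start, end):
--     return abs(start[0] - end[0]) + abs(start[1] - end[1])
--
-- def get_blocked_area(sensor, beacon):
--     out = set()
--     distance = get_taxi_distance(sensor, beacon)
--     for x in range(sensor[0] - distance, sensor[0] + distance + 1):
--         delta = sensor[0] - x
--         delta = abs(delta - distance) if delta > 0 else abs(delta + distance)
--         if sensor[1] - delta <= Y < sensor[1] + delta + 1:
--             out.add((x, Y))
--     return out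
-- ===== SOURCE B (Python) =====
-- Y = 2000000
--
-- def get_blocked_area(sensor, beacon):
--     # row-intersection radius: the scan is replaced by a direct interval walk
--     sx = sensor[0]
--     r = abs(sx - beacon[0]) + abs(sensor[1] - beacon[1]) - abs(Y - sensor[1])
--     out = set()
--     x = sx - r
--     while x <= sx + r:
--         out.add((x, Y))
--         x += 1
--     return out
-- ===== Notes on version B (the rewrite author's own statement) =====
-- stated objective: faster
-- what changed: A scans all 2*distance+1 x positions and tests each against row Y; B computes the row-intersection radius r = distance - |Y - sensor[1]| in O(1) and walks only the interval [sensor[0]-r, sensor[0]+r] with a single while loop (no per-x test, empty when r < 0).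
import Mathlib
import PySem

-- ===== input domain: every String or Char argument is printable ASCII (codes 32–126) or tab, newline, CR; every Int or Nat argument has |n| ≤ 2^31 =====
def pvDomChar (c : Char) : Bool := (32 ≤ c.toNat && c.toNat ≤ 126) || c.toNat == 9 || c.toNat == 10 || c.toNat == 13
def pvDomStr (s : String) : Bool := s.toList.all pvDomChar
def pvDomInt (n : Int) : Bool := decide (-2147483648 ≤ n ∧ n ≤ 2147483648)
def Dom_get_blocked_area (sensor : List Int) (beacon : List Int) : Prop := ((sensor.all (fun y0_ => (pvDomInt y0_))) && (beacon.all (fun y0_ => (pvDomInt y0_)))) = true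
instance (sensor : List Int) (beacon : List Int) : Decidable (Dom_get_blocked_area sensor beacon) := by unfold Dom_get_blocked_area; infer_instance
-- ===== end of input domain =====

-- B replaces A's scan over the whole x-range of the sensor (one membership test per x)
-- by computing the row-intersection radius r = distance - |Y - sensor[1]| and walking
-- only the interval [sensor[0]-r, sensor[0]+r] with a while loop (faster: asymptotic).

-- ===== PORT A =====
def get_blocked_area (sensor : List Int) (beacon : List Int) : List (Int × Int) :=
  let YY : Int := 2000000
  let sx := (PySem.List.pyGet? sensor 0).getD 0   -- Pre_ guarantees the index is in range
  let sy := (PySem.List.pyGet? sensor 1).getD 0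
  let bx := (PySem.List.pyGet? beacon 0).getD 0
  let by' := (PySem.List.pyGet? beacon 1).getD 0
  let distance := |sx - bx| + |sy - by'|
  (PySem.List.pyRange (sx - distance) (sx + distance + 1) 1).foldl
    (fun out x =>
      let delta := sx - x
      let delta := if delta > 0 then |delta - distance| else |delta + distance|
      if sy - delta ≤ YY ∧ YY < sy + delta + 1 then PySem.Set.add out (x, YY) else out)
    (PySem.Set.empty)

-- ===== PORT B =====
/-- The `while x <= sx + r` loop of Source B; the fuel is its exact iteration count
`(2*r+1).toNat` (zero when `r < 0`, i.e. the condition fails at once). -/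
def pvLoop : Nat → Int → List (Int × Int) → List (Int × Int)
  | 0, _, out => out
  | n + 1, x, out => pvLoop n (x + 1) (PySem.Set.add out (x, 2000000))

def get_blocked_area_alt (sensor : List Int) (beacon : List Int) : List (Int × Int) :=
  let sx := (PySem.List.pyGet? sensor 0).getD 0   -- Pre_ guarantees the index is in range
  let r := |sx - (PySem.List.pyGet? beacon 0).getD 0|
           + |(PySem.List.pyGet? sensor 1).getD 0 - (PySem.List.pyGet? beacon 1).getD 0|
           - |(2000000 : Int) - (PySem.List.pyGet? sensor 1).getD 0|
  pvLoop (2 * r + 1).toNat (sx - r) PySem.Set.empty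

-- ===== PRECONDITION & SPEC =====
-- A raises IndexError when either list has fewer than two elements; Pre_ excludes exactly that.
def Pre_get_blocked_area (sensor : List Int) (beacon : List Int) : Prop :=
  2 ≤ sensor.length ∧ 2 ≤ beacon.length
instance (sensor : List Int) (beacon : List Int) : Decidable (Pre_get_blocked_area sensor beacon) := by unfold Pre_get_blocked_area; infer_instance

def pvWitness_get_blocked_area : List Int × List Int := ([0, 2000000], [1, 2000000])

def Spec_get_blocked_area (sensor : List Int) (beacon : List Int) (out : List (Int × Int)) : Prop := out = get_blocked_area_alt sensor beacon
instance (sensor : List Int) (beacon : List Int) (out : List (Int × Int)) : Decidable (Spec_get_blocked_area sensor beacon out) := by unfold Spec_get_blocked_area; infer_instance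

-- ===== CLAIM (what is proved, stated in full; the proofs are below) =====
def Claim_equal_get_blocked_area : Prop := ∀ (sensor : List Int) (beacon : List Int), Dom_get_blocked_area sensor beacon → Pre_get_blocked_area sensor beacon → Spec_get_blocked_area sensor beacon (get_blocked_area sensor beacon)

-- ===== LEMMAS AND PROOFS =====

lemma pyGet0 (a b : Int) (t : List Int) : (PySem.List.pyGet? (a :: b :: t) 0).getD 0 = a := by
  simp [PySem.List.pyGet?, PySem.List.pyIdx?]
  rw [if_pos (by omega)]
  rfl

lemma pyGet1 (a b : Int) (t : List Int) : (PySem.List.pyGet? (a :: b :: t) 1).getD 0 = b := by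
  simp [PySem.List.pyGet?, PySem.List.pyIdx?]

/-- The loop/filter condition of A's port, named so it can be rewritten. -/
def pvCond (s0 s1 d : Int) : Int → Bool := fun x =>
  let delta := s0 - x
  let delta := if delta > 0 then |delta - d| else |delta + d|
  decide (s1 - delta ≤ (2000000:Int) ∧ (2000000:Int) < s1 + delta + 1)

/-- A's loop, adding a fresh pair per qualifying iteration, is a filter-map append. -/
lemma portA_loop (s0 s1 d : Int) :
    ∀ (l : List Int) (s : List (Int × Int)), l.Nodup → (∀ x ∈ l, (x, (2000000:Int)) ∉ s) →
    l.foldl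
      (fun out x =>
        let delta := s0 - x
        let delta := if delta > 0 then |delta - d| else |delta + d|
        if s1 - delta ≤ (2000000:Int) ∧ (2000000:Int) < s1 + delta + 1 then
          PySem.Set.add out (x, (2000000:Int)) else out) s
      = s ++ (l.filter (pvCond s0 s1 d)).map (fun x => (x, (2000000:Int))) := by
  intro l
  induction l with
  | nil => intro s _ _; simp
  | cons a l ih =>
    intro s hnd hs
    by_cases hca : s1 - (if s0 - a > 0 then |s0 - a - d| else |s0 - a + d|) ≤ (2000000:Int) ∧
        (2000000:Int) < s1 + (if s0 - a > 0 then |s0 - a - d| else |s0 - a + d|) + 1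
    · have hadd : PySem.Set.add s (a, (2000000:Int)) = s ++ [(a, (2000000:Int))] :=
        PySem.Set.add_of_not_mem (hs a (by simp))
      simp only [List.foldl_cons, if_pos hca, hadd]
      rw [ih (s ++ [(a, (2000000:Int))]) hnd.of_cons]
      · rw [List.filter_cons, if_pos (by simp only [pvCond, decide_eq_true_eq]; exact hca),
            List.map_cons, List.append_assoc, List.singleton_append]
      · intro x hx
        simp only [List.mem_append, List.mem_singleton]
        push_neg
        refine ⟨hs x (by simp [hx]), ?_⟩
        intro hcontra
        have : x = a := by simpa using congrArg Prod.fst hcontra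
        exact (List.nodup_cons.mp hnd).1 (this ▸ hx)
    · simp only [List.foldl_cons, if_neg hca]
      rw [ih s hnd.of_cons (fun x hx => hs x (by simp [hx]))]
      rw [List.filter_cons, if_neg (by simp only [pvCond, decide_eq_true_eq]; exact hca)]

/-- Inside the scanned range the loop condition says exactly |x - s0| ≤ d - |2000000 - s1|. -/
lemma cond_eval (s0 s1 d x : Int) (hx1 : s0 - d ≤ x) (hx2 : x < s0 + d + 1) :
    pvCond s0 s1 d x
    = decide (s0 - (d - |2000000 - s1|) ≤ x ∧ x ≤ s0 + (d - |2000000 - s1|)) := by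
  unfold pvCond
  by_cases h : s0 - x > 0
  · simp only [if_pos h, decide_eq_decide]
    rcases abs_cases (s0 - x - d) with ⟨h1, h2⟩ | ⟨h1, h2⟩ <;>
      rcases abs_cases ((2000000:Int) - s1) with ⟨h3, h4⟩ | ⟨h3, h4⟩ <;>
      rw [h1, h3] <;> omega
  · simp only [if_neg h, decide_eq_decide]
    rcases abs_cases (s0 - x + d) with ⟨h1, h2⟩ | ⟨h1, h2⟩ <;>
      rcases abs_cases ((2000000:Int) - s1) with ⟨h3, h4⟩ | ⟨h3, h4⟩ <;>
      rw [h1, h3] <;> omega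

/-- B's while loop appends exactly the ascending interval of length `n` starting at `x`,
provided everything already in `out` lies strictly left of `x`. -/
lemma pvLoop_eq (n : Nat) : ∀ (x : Int) (out : List (Int × Int)),
    (∀ p ∈ out, p.1 < x) →
    pvLoop n x out = out ++ (PySem.List.pyRange x (x + n) 1).map (fun t => (t, (2000000:Int))) := by
  induction n with
  | zero =>
    intro x out _
    simp [pvLoop]
  | succ n ih =>
    intro x out hout
    have hadd : PySem.Set.add out (x, (2000000:Int)) = out ++ [(x, (2000000:Int))] :=
      PySem.Set.add_of_not_mem (fun hmem => absurd (hout _ hmem) (by simp))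
    have hrange : PySem.List.pyRange x (x + (n+1:Nat)) 1
        = x :: PySem.List.pyRange (x + 1) ((x + 1) + n) 1 := by
      have hcast : (x + ((n + 1 : Nat) : Int)) = (x + 1) + (n : Int) := by push_cast; ring
      rw [PySem.List.pyRange_one_cons (by push_cast; omega), hcast]
    rw [pvLoop, hadd, ih (x + 1) _ (by
      intro p hp
      rcases List.mem_append.mp hp with h | h
      · exact lt_trans (hout p h) (by omega)
      · simp only [List.mem_singleton] at h; subst h; exact lt_add_one x)]
    rw [hrange, List.map_cons, List.append_assoc, List.singleton_append]

theorem get_blocked_area_spec : Claim_equal_get_blocked_area := by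
  intro sensor beacon _ hpre
  obtain ⟨hs, hb⟩ := hpre
  match sensor, beacon with
  | s0 :: s1 :: t, b0 :: b1 :: u =>
    unfold Spec_get_blocked_area get_blocked_area get_blocked_area_alt
    simp only [pyGet0, pyGet1]
    set d : Int := |s0 - b0| + |s1 - b1| with hd
    set r : Int := |s0 - b0| + |s1 - b1| - |2000000 - s1| with hr
    have hd0 : 0 ≤ d := by positivity
    have hrd : r ≤ d := by have := abs_nonneg ((2000000:Int) - s1); omega
    rw [portA_loop s0 s1 d _ _ (PySem.List.nodup_pyRange_one _ _) (by simp [PySem.Set.empty])]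
    rw [pvLoop_eq _ _ _ (by simp [PySem.Set.empty])]
    simp only [PySem.Set.empty, List.nil_append]
    by_cases hneg : r < 0
    · have hfuel : ((2 * r + 1).toNat : Int) = 0 := by omega
      have hnilB : PySem.List.pyRange (s0 - r) (s0 - r + ((2 * r + 1).toNat : Nat)) 1 = [] :=
        PySem.List.pyRange_one_eq_nil (by omega)
      have hnilA : (PySem.List.pyRange (s0 - d) (s0 + d + 1) 1).filter (pvCond s0 s1 d) = [] := by
        rw [List.filter_eq_nil_iff]
        intro x hx
        rw [PySem.List.mem_pyRange_one] at hx
        rw [cond_eval s0 s1 d x (by omega) (by omega)]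
        simp only [decide_eq_true_eq]
        omega
      rw [hnilA, hnilB]
    · push_neg at hneg
      have hends : s0 - r + ((2 * r + 1).toNat : Nat) = (s0 + r + 1 : Int) := by omega
      rw [hends]
      have hsplit : PySem.List.pyRange (s0 - d) (s0 + d + 1) 1
          = PySem.List.pyRange (s0 - d) (s0 - r) 1 ++
            (PySem.List.pyRange (s0 - r) (s0 + r + 1) 1 ++
             PySem.List.pyRange (s0 + r + 1) (s0 + d + 1) 1) := by
        rw [← PySem.List.pyRange_one_append (s0 - r) (s0 + r + 1) (s0 + d + 1) (by omega) (by omega),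
            ← PySem.List.pyRange_one_append (s0 - d) (s0 - r) (s0 + d + 1) (by omega) (by omega)]
      rw [hsplit, List.filter_append, List.filter_append]
      have hleft : (PySem.List.pyRange (s0 - d) (s0 - r) 1).filter (pvCond s0 s1 d) = [] := by
        rw [List.filter_eq_nil_iff]
        intro x hx
        rw [PySem.List.mem_pyRange_one] at hx
        rw [cond_eval s0 s1 d x (by omega) (by omega)]
        simp only [decide_eq_true_eq]
        omega
      have hright : (PySem.List.pyRange (s0 + r + 1) (s0 + d + 1) 1).filter (pvCond s0 s1 d) = [] := by
        rw [List.filter_eq_nil_iff]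
        intro x hx
        rw [PySem.List.mem_pyRange_one] at hx
        rw [cond_eval s0 s1 d x (by omega) (by omega)]
        simp only [decide_eq_true_eq]
        omega
      have hmid : (PySem.List.pyRange (s0 - r) (s0 + r + 1) 1).filter (pvCond s0 s1 d)
          = PySem.List.pyRange (s0 - r) (s0 + r + 1) 1 := by
        rw [List.filter_eq_self]
        intro x hx
        rw [PySem.List.mem_pyRange_one] at hx
        rw [cond_eval s0 s1 d x (by omega) (by omega)]
        simp only [decide_eq_true_eq]
        omega
      rw [hleft, hright, hmid, List.nil_append, List.append_nil]
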